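-- pv_equiv track=rewrite | github.com/alexshchegretsov/algorithms | other/ascii.py | solution
-- ===== SOURCE A (Python) =====
-- def initializer(number: int) -> tuple:
--     height = number
--     width = number * 2 - 1
--     rows = [[' ' for _ in range(width)] for _ in range(height)]
--     return height, width, rows
--
-- def solution(number: int):
--     height, width, rows = initializer(number)
--     for row_id in range(height):
--         for cell_id in range(width):
--             if cell_id == (number - 1 - row_id) or cell_id == (number - 1 + row_id):
--                 rows[row_id][cell_id] = str(number)
--                 # rows vertically decreasing number
--                 next_row = row_id + 1
--                 decreasing_num = number - 1
--                 while next_row < height: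
--                     rows[next_row][cell_id] = str(decreasing_num)
--                     next_row += 1
--                     decreasing_num -= 1
--     # unite first half within revers first half
--     rows.extend(rows[:-1][::-1])
--     return rows
-- ===== SOURCE B (Python) =====
-- def solution(number: int):
--     # Per-cell closed form: distance r = |c - (number-1)| to the centre column;
--     # a cell shows str(number - (i - r)) once the row index i reaches r, else a space.
--     rows = [
--         [' ' if i < abs(c - (number - 1)) else str(number - i + abs(c - (number - 1)))
--          for c in range(2 * number - 1)]
--         for i in range(number)
--     ]
--     return rows + rows[:-1][::-1]
-- ===== Notes on version B (the rewrite author's own statement) =====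
-- stated objective: simpler
-- what changed: Replaces A's mark-the-diagonal-then-propagate-downward simulation (nested loops plus an inner while loop mutating the grid) by a single comprehension computing each cell directly from its distance r = |c-(number-1)| to the centre column, then appends the mirrored upper half.
import Mathlib
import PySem

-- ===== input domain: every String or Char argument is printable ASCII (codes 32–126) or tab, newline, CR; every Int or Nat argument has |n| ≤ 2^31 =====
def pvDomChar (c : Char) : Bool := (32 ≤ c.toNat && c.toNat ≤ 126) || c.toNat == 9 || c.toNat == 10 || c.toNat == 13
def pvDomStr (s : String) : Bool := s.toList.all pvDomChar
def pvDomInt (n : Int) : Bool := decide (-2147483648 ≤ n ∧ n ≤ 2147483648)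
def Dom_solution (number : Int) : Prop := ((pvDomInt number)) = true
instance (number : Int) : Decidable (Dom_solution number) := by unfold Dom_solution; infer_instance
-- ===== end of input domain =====

-- B replaces A's mark-then-propagate simulation (inner while loop) by a per-cell closed form
-- using the distance to the centre column: simpler, one comprehension.

-- ===== PORT A =====
-- the inner 'while next_row < height' loop of A, step for step
def fillDown (g : List (List String)) (next_row cell_id : Nat) (dec : Int) (height : Nat) :
    List (List String) :=
  if _h : next_row < height then
    fillDown (g.modify next_row (fun row => row.set cell_id (PySem.Int.toStr dec)))
      (next_row + 1) cell_id (dec - 1) height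
  else g
termination_by height - next_row

def initializer (number : Int) : Int × Int × List (List String) :=
  (number, number * 2 - 1,
    (List.range number.toNat).map (fun _ => (List.range (number * 2 - 1).toNat).map (fun _ => " ")))

-- range(height)/range(width) yield exactly 0..k-1, so the Nat-valued List.range is exact here
def solution (number : Int) : List (List String) :=
  let t := initializer number
  let rows := (List.range t.1.toNat).foldl (fun (g : List (List String)) (row_id : Nat) =>
      (List.range t.2.1.toNat).foldl (fun (g : List (List String)) (cell_id : Nat) =>
        if ((cell_id : Int) = number - 1 - (row_id : Int) ∨
            (cell_id : Int) = number - 1 + (row_id : Int)) then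
          fillDown (g.modify row_id (fun row => row.set cell_id (PySem.Int.toStr number)))
            (row_id + 1) cell_id (number - 1) t.1.toNat
        else g) g) t.2.2
  -- rows.extend(rows[:-1][::-1]);  [::-1] is reverse (PySem.List.slice?_none_none_neg_one)
  rows ++ (PySem.List.slice rows none (some (-1))).reverse

-- ===== PORT B =====
def solution_alt (number : Int) : List (List String) :=
  let rows := (PySem.List.pyRange 0 number 1).map (fun i =>
      (PySem.List.pyRange 0 (2 * number - 1) 1).map (fun c =>
        if i < |c - (number - 1)| then " "
        else PySem.Int.toStr (number - i + |c - (number - 1)|)))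
  rows ++ (PySem.List.slice rows none (some (-1))).reverse

-- ===== PRECONDITION & SPEC =====
def Spec_solution (number : Int) (out : List (List String)) : Prop := out = solution_alt number
instance (number : Int) (out : List (List String)) : Decidable (Spec_solution number out) := by unfold Spec_solution; infer_instance

-- ===== CLAIM (what is proved, stated in full; the proofs are below) =====
def Claim_equal_solution : Prop := ∀ (number : Int), Dom_solution number → Spec_solution number (solution number)

-- ===== LEMMAS AND PROOFS =====

-- canonical form of a grid: every intermediate state of A's loops is a gridF
def gridF (h w : Nat) (P : Nat → Nat → String) : List (List String) :=
  (List.range h).map (fun i => (List.range w).map (P i))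

lemma grid_congr {h w : Nat} {P Q : Nat → Nat → String}
    (H : ∀ i, i < h → ∀ c, c < w → P i c = Q i c) : gridF h w P = gridF h w Q := by
  unfold gridF
  refine List.map_congr_left (fun i hi => ?_)
  refine List.map_congr_left (fun c hc => ?_)
  exact H i (List.mem_range.mp hi) c (List.mem_range.mp hc)

lemma set_range_map {w c : Nat} (f : Nat → String) (v : String) :
    ((List.range w).map f).set c v
      = (List.range w).map (fun c' => if c' = c then v else f c') := by
  apply List.ext_getElem
  · simp
  · intro k h1 h2
    simp only [List.getElem_set, List.getElem_map, List.getElem_range]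
    simp at h1
    split_ifs with hk hk' hk'
    · rfl
    · omega
    · omega
    · rfl

lemma modify_range_map {h i : Nat} (F : Nat → List String) (G : List String → List String) :
    ((List.range h).map F).modify i G
      = (List.range h).map (fun i' => if i' = i then G (F i) else F i') := by
  apply List.ext_getElem
  · simp
  · intro k h1 h2
    simp only [List.getElem_modify, List.getElem_map, List.getElem_range]
    split_ifs with hk hk' hk'
    · subst hk; rfl
    · omega
    · omega
    · rfl

lemma setCell_grid (h w : Nat) (P : Nat → Nat → String) (k c : Nat) (v : String) :
    (gridF h w P).modify k (fun row => row.set c v)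
      = gridF h w (fun i c' => if i = k ∧ c' = c then v else P i c') := by
  unfold gridF
  rw [modify_range_map]
  apply List.map_congr_left
  intro i _
  split_ifs with hik
  · subst hik
    rw [set_range_map]
    apply List.map_congr_left
    intro c' _
    beta_reduce
    split_ifs <;> tauto
  · apply List.map_congr_left
    intro c' _
    beta_reduce
    rw [if_neg (by tauto)]

lemma fillDown_grid (h w c : Nat) :
    ∀ (fuel k : Nat), h - k = fuel → ∀ (d : Int) (P : Nat → Nat → String),
      fillDown (gridF h w P) k c d h
        = gridF h w (fun i c' =>
            if c' = c ∧ k ≤ i then PySem.Int.toStr (d - ((i : Int) - (k : Int))) else P i c') := by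
  intro fuel
  induction fuel with
  | zero =>
    intro k hk d P
    rw [fillDown, dif_neg (by omega)]
    apply grid_congr
    intro i hi c' _
    beta_reduce
    rw [if_neg (by omega)]
  | succ fuel ih =>
    intro k hk d P
    rw [fillDown, dif_pos (by omega), setCell_grid, ih (k + 1) (by omega)]
    apply grid_congr
    intro i hi c' _
    beta_reduce
    split_ifs with h1 h2 h3 h3 <;> first | rfl | omega | (congr 1; omega)

set_option maxHeartbeats 1000000 in
lemma inner_fold (number : Int) (h w m : Nat) (_hm : m < h) :
    ∀ (L : List Nat), (∀ c ∈ L, c < w) → ∀ (Q : Nat → Nat → String),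
      L.foldl (fun (g : List (List String)) (cell_id : Nat) =>
          if ((cell_id : Int) = number - 1 - (m : Int) ∨
              (cell_id : Int) = number - 1 + (m : Int)) then
            fillDown (g.modify m (fun row => row.set cell_id (PySem.Int.toStr number)))
              (m + 1) cell_id (number - 1) h
          else g) (gridF h w Q)
      = gridF h w (fun i c =>
          if (c ∈ L ∧ ((c : Int) = number - 1 - (m : Int) ∨ (c : Int) = number - 1 + (m : Int))
              ∧ m ≤ i) then
            PySem.Int.toStr (number - ((i : Int) - (m : Int)))
          else Q i c) := by
  intro L
  induction L with
  | nil =>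
    intro _ Q
    simp only [List.foldl_nil]
    apply grid_congr
    intro i hi c hc
    beta_reduce
    rw [if_neg (by simp)]
  | cons a L ih =>
    intro hL Q
    simp only [List.foldl_cons]
    by_cases ha : ((a : Int) = number - 1 - (m : Int) ∨ (a : Int) = number - 1 + (m : Int))
    · rw [if_pos ha, setCell_grid,
        fillDown_grid h w a (h - (m + 1)) (m + 1) rfl,
        ih (fun c hc => hL c (List.mem_cons_of_mem a hc))]
      apply grid_congr
      intro i hi c hc
      beta_reduce
      simp only [List.mem_cons]
      by_cases hcL : c ∈ L
      · split_ifs <;> first | omega | (congr 1; omega) | tauto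
      · by_cases hca : c = a
        · subst hca
          rw [if_neg (by tauto)]
          split_ifs with h1 h2 h3 h3 h4 <;>
            first | omega | (congr 1; omega) | tauto
        · split_ifs <;> tauto
    · rw [if_neg ha, ih (fun c hc => hL c (List.mem_cons_of_mem a hc))]
      apply grid_congr
      intro i hi c hc
      beta_reduce
      simp only [List.mem_cons]
      by_cases hca : c = a
      · subst hca
        split_ifs <;> tauto
      · split_ifs <;> first | rfl | tauto

lemma outer_fold (number : Int) (h w : Nat) (hh : h = number.toNat)
    (hw : w = (number * 2 - 1).toNat) :
    ∀ m, m ≤ h →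
      (List.range m).foldl (fun (g : List (List String)) (row_id : Nat) =>
        (List.range w).foldl (fun (g : List (List String)) (cell_id : Nat) =>
          if ((cell_id : Int) = number - 1 - (row_id : Int) ∨
              (cell_id : Int) = number - 1 + (row_id : Int)) then
            fillDown (g.modify row_id (fun row => row.set cell_id (PySem.Int.toStr number)))
              (row_id + 1) cell_id (number - 1) h
          else g) g) (gridF h w (fun _ _ => " "))
      = gridF h w (fun i c =>
          if (|(c : Int) - (number - 1)| ≤ (i : Int) ∧ |(c : Int) - (number - 1)| < (m : Int)) then
            PySem.Int.toStr (number - ((i : Int) - |(c : Int) - (number - 1)|))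
          else " ") := by
  intro m
  induction m with
  | zero =>
    intro _
    simp only [List.range_zero, List.foldl_nil]
    apply grid_congr
    intro i hi c hc
    beta_reduce
    rw [if_neg (by
      have := abs_nonneg ((c : Int) - (number - 1))
      omega)]
  | succ m ih =>
    intro hm
    rw [List.range_succ, List.foldl_append, ih (by omega), List.foldl_cons, List.foldl_nil,
      inner_fold number h w m (by omega) (List.range w) (fun c hc => List.mem_range.mp hc)]
    apply grid_congr
    intro i hi c hc
    beta_reduce
    simp only [List.mem_range]
    rcases abs_cases ((c : Int) - (number - 1)) with ⟨he, hs⟩ | ⟨he, hs⟩ <;>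
      rw [he] <;>
      split_ifs <;>
      first | rfl | omega | (congr 1; omega)

set_option maxHeartbeats 1000000 in
lemma rows_eq (number : Int) :
    gridF number.toNat (number * 2 - 1).toNat (fun i c =>
        if (|(c : Int) - (number - 1)| ≤ (i : Int)
            ∧ |(c : Int) - (number - 1)| < (number.toNat : Int)) then
          PySem.Int.toStr (number - ((i : Int) - |(c : Int) - (number - 1)|))
        else " ")
      = (PySem.List.pyRange 0 number 1).map (fun i =>
          (PySem.List.pyRange 0 (2 * number - 1) 1).map (fun c =>
            if i < |c - (number - 1)| then " "
            else PySem.Int.toStr (number - i + |c - (number - 1)|))) := by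
  rw [PySem.List.pyRange_one, PySem.List.pyRange_one]
  simp only [Int.sub_zero, zero_add, List.map_map]
  rw [show (2 * number - 1 : Int) = number * 2 - 1 by ring]
  unfold gridF
  apply List.map_congr_left
  intro i hi
  apply List.map_congr_left
  intro c hc
  simp only [List.mem_range] at hi hc
  simp only [Function.comp_apply]
  rcases abs_cases ((c : Int) - (number - 1)) with ⟨he, hs⟩ | ⟨he, hs⟩ <;>
    rw [he] <;>
    split_ifs <;>
    first | rfl | omega | (congr 1; omega)

-- ===== VERDICT (by name: the statement is the Claim_ definition above) =====
set_option maxHeartbeats 1000000 in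
theorem solution_spec : Claim_equal_solution := by
  intro number _
  unfold Spec_solution solution solution_alt initializer
  simp only []
  rw [show (List.map (fun _ : Nat => List.map (fun _ : Nat => " ") (List.range (number * 2 - 1).toNat))
        (List.range number.toNat))
      = gridF number.toNat (number * 2 - 1).toNat (fun _ _ => " ") from rfl]
  rw [outer_fold number number.toNat (number * 2 - 1).toNat rfl rfl number.toNat le_rfl]
  rw [rows_eq]
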